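-- pv_equiv track=rewrite | github.com/AkshatKhanna1/Leetcode-Solutions | PrefixSum/number-of-ways-to-split-array.py | waysToSplitArray
-- ===== SOURCE A (Python) =====
-- from typing import List
--
-- def waysToSplitArray(nums: List[int]) -> int:
--     sumRight=0
--     for i in nums:
--         sumRight+=i
--     sumLeft=0
--     count=0
--     for i in nums[0:-1]:
--         sumLeft+=i
--         sumRight-=i
--         if sumLeft>=sumRight:
--             count+=1
--     return count
-- ===== SOURCE B (Python) =====
-- def waysToSplitArray(nums):
--     # Counting split points is order-independent in the prefix sums, so:
--     # build prefix sums of nums[:-1], sort them, and binary-search the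
--     # threshold t = ceil(total/2); every sorted prefix >= t is a valid split.
--     total = sum(nums)
--     prefixes = []
--     s = 0
--     for x in nums[:-1]:
--         s += x
--         prefixes.append(s)
--     prefixes.sort()
--     t = (total + 1) // 2  # smallest integer s with 2*s >= total
--     lo, hi = 0, len(prefixes)
--     while lo < hi:
--         mid = (lo + hi) // 2
--         if prefixes[mid] < t:
--             lo = mid + 1
--         else:
--             hi = mid
--     return len(prefixes) - lo
-- ===== Notes on version B (the rewrite author's own statement) =====
-- stated objective: alternative
-- what changed: Instead of threading two mutually-updated running sums through one loop and comparing at every step, B exploits that the count of valid splits is order-independent: it materializes the prefix sums of nums[:-1], sorts them, and finds by hand-written binary search the first position reaching the threshold ceil(total/2); the answer is the number of sorted prefixes at or above it.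
import Mathlib
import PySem

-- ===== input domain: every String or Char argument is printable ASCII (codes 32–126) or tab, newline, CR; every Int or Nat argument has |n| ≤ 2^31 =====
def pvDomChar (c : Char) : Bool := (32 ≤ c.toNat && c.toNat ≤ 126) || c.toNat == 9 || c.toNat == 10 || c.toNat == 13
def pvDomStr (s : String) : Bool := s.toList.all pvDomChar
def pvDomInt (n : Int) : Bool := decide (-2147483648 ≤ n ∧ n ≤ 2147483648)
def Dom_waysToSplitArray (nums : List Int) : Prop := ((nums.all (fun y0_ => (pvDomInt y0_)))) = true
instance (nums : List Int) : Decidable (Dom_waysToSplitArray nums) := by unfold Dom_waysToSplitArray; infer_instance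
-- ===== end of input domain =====

-- B replaces A's single loop over two mutually-updated running sums by a different strategy:
-- the count of valid splits is order-independent in the prefix sums, so B sorts the prefix
-- sums of nums[:-1] and binary-searches the threshold ceil(total/2). Return values proved equal.

-- ===== PORT A =====
-- A: sumRight = sum of nums; then one loop over nums[0:-1] updating (sumLeft, sumRight, count).
def waysToSplitArray (nums : List Int) : Int :=
  let sumRight : Int := nums.foldl (fun acc i => acc + i) 0
  let st := (PySem.List.slice nums (some 0) (some (-1))).foldl
    (fun (st : Int × Int × Int) i =>
      let sumLeft := st.1 + i
      let sumRight := st.2.1 - i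
      if sumLeft ≥ sumRight then (sumLeft, sumRight, st.2.2 + 1)
      else (sumLeft, sumRight, st.2.2))
    (0, sumRight, 0)
  st.2.2

-- ===== PORT B =====
-- B's hand-written `while lo < hi` binary search; lo/hi stay in [0, len] so Nat is exact,
-- and (lo+hi)//2 on nonnegative ints is Nat division.  prefixes[mid] is always in range,
-- rendered as getD with default 0.
def pvBsearch (ls : List Int) (t : Int) (lo hi : Nat) : Nat :=
  if lo < hi then
    let mid := (lo + hi) / 2
    if ls.getD mid 0 < t then pvBsearch ls t (mid + 1) hi
    else pvBsearch ls t lo mid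
  else lo
termination_by hi - lo
decreasing_by all_goals omega

-- B: total = sum(nums); build prefix sums of nums[:-1]; sort; t = (total+1)//2; binary search.
def waysToSplitArray_alt (nums : List Int) : Int :=
  let total : Int := nums.sum
  let build := (PySem.List.slice nums none (some (-1))).foldl
    (fun (st : List Int × Int) x => (st.1 ++ [st.2 + x], st.2 + x)) ([], 0)
  let prefixes := build.1
  let sortedP := PySem.List.sorted prefixes (fun x => x) false
  let t := PySem.Int.floordiv (total + 1) 2
  let lo := pvBsearch sortedP t 0 sortedP.length
  (sortedP.length : Int) - (lo : Int)

-- ===== PRECONDITION & SPEC =====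
def Spec_waysToSplitArray (nums : List Int) (out : Int) : Prop := out = waysToSplitArray_alt nums
instance (nums : List Int) (out : Int) : Decidable (Spec_waysToSplitArray nums out) := by unfold Spec_waysToSplitArray; infer_instance

-- ===== CLAIM (what is proved, stated in full; the proofs are below) =====
def Claim_equal_waysToSplitArray : Prop := ∀ (nums : List Int), Dom_waysToSplitArray nums → Spec_waysToSplitArray nums (waysToSplitArray nums)

-- ===== LEMMAS AND PROOFS =====

/-- Running prefix sums of `l` starting from accumulated value `s`. -/
def prefixSums (l : List Int) (s : Int) : List Int :=
  match l with
  | [] => []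
  | x :: xs => (s + x) :: prefixSums xs (s + x)

/-- B's building fold builds exactly (prefixSums, running sum). -/
lemma b_build (l : List Int) (p : List Int) (s : Int) :
    l.foldl (fun (st : List Int × Int) x => (st.1 ++ [st.2 + x], st.2 + x)) (p, s)
      = (p ++ prefixSums l s, s + l.sum) := by
  induction l generalizing p s with
  | nil => simp [prefixSums]
  | cons x xs ih => simp [prefixSums, ih, add_assoc]

/-- A's loop, with the invariant sumLeft + sumRight constant, counts threshold prefixes. -/
lemma a_loop (l : List Int) (sl sr c : Int) :
    (l.foldl
      (fun (st : Int × Int × Int) i =>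
        let sumLeft := st.1 + i
        let sumRight := st.2.1 - i
        if sumLeft ≥ sumRight then (sumLeft, sumRight, st.2.2 + 1)
        else (sumLeft, sumRight, st.2.2))
      (sl, sr, c)).2.2
      = c + (((prefixSums l sl).countP (fun p => decide (2 * p ≥ sl + sr))) : Int) := by
  induction l generalizing sl sr c with
  | nil => simp [prefixSums]
  | cons x xs ih =>
    have hcond : (sl + x ≥ sr - x) ↔ (2 * (sl + x) ≥ sl + sr) := by constructor <;> intro h <;> omega
    have hkey : (sl + x) + (sr - x) = sl + sr := by ring
    by_cases h : sl + x ≥ sr - x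
    · have h2 : decide (2 * (sl + x) ≥ sl + sr) = true := by simpa using hcond.mp h
      simp only [List.foldl_cons, if_pos h, prefixSums]
      rw [ih, hkey, List.countP_cons, h2]
      push_cast
      simp
      ring
    · have h2 : decide (2 * (sl + x) ≥ sl + sr) = false := by
        simp only [decide_eq_false_iff_not]
        exact fun hh => h (hcond.mpr hh)
      simp only [List.foldl_cons, if_neg h, prefixSums]
      rw [ih, hkey, List.countP_cons, h2]
      simp

lemma foldl_add_eq_sum (l : List Int) :
    l.foldl (fun acc i => acc + i) 0 = l.sum := by
  simp [List.sum_eq_foldl]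

/-- On a list sorted in nondecreasing order, the binary search returns a frontier index:
    everything strictly below it is < t, everything at or above it (within [lo,hi) extended
    by the initial invariants) is ≥ t; and the result stays in [lo, hi]. -/
lemma bsearch_frontier (ls : List Int) (t : Int) (hp : ls.Pairwise (· ≤ ·)) :
    ∀ lo hi, lo ≤ hi → hi ≤ ls.length →
    (∀ i, i < lo → ls.getD i 0 < t) →
    (∀ i, hi ≤ i → i < ls.length → ¬ ls.getD i 0 < t) →
    (∀ i, i < pvBsearch ls t lo hi → ls.getD i 0 < t) ∧
    (∀ i, pvBsearch ls t lo hi ≤ i → i < ls.length → ¬ ls.getD i 0 < t) ∧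
    pvBsearch ls t lo hi ≤ hi := by
  have hmono : ∀ i j, i ≤ j → j < ls.length → ls.getD i 0 ≤ ls.getD j 0 := by
    intro i j hij hj
    rcases Nat.lt_or_ge i j with h | h
    · rw [List.getD_eq_getElem ls 0 (by omega), List.getD_eq_getElem ls 0 hj]
      exact (List.pairwise_iff_getElem.mp hp) i j (by omega) hj h
    · have : i = j := by omega
      subst this; exact le_refl _
  intro lo hi
  generalize hn : hi - lo = n
  induction n using Nat.strong_induction_on generalizing lo hi with
  | _ n ih =>
    intro hlh hhl hlo hhi
    rw [pvBsearch]
    by_cases hcmp : lo < hi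
    · rw [if_pos hcmp]
      by_cases hmid : ls.getD ((lo + hi) / 2) 0 < t
      · rw [if_pos hmid]
        refine ih (hi - ((lo + hi) / 2 + 1)) (by omega) _ _ rfl (by omega) hhl ?_ hhi
        intro i hi'
        exact lt_of_le_of_lt (hmono i ((lo + hi) / 2) (by omega) (by omega)) hmid
      · rw [if_neg hmid]
        refine ih ((lo + hi) / 2 - lo) (by omega) _ _ rfl (by omega) (by omega) hlo ?_
          |>.imp id (fun h => ⟨h.1, by omega⟩)
        intro i hge hilen hlt
        exact hmid (lt_of_le_of_lt (hmono ((lo + hi) / 2) i hge hilen) hlt)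
    · rw [if_neg hcmp]
      have : lo = hi := by omega
      subst this
      exact ⟨hlo, fun i h1 h2 => hhi i h1 h2, le_refl _⟩

/-- With such a frontier r, countP (< t) = r. -/
lemma countP_eq_frontier (ls : List Int) (t : Int) (r : Nat) (hr : r ≤ ls.length)
    (h1 : ∀ i, i < r → ls.getD i 0 < t)
    (h2 : ∀ i, r ≤ i → i < ls.length → ¬ ls.getD i 0 < t) :
    ls.countP (fun p => decide (p < t)) = r := by
  have hsplit : ls = ls.take r ++ ls.drop r := (List.take_append_drop r ls).symm
  rw [hsplit, List.countP_append]
  have hta : (ls.take r).countP (fun p => decide (p < t)) = r := by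
    rw [List.countP_eq_length.mpr, List.length_take_of_le hr]
    intro a ha
    obtain ⟨i, hi, hgi⟩ := List.mem_iff_getElem.mp ha
    have hi' : i < r := by simpa [List.length_take, hr] using hi
    have : a = ls.getD i 0 := by
      rw [List.getD_eq_getElem ls 0 (by omega), ← hgi, List.getElem_take]
    rw [this]; exact decide_eq_true (h1 i hi')
  have htd : (ls.drop r).countP (fun p => decide (p < t)) = 0 := by
    rw [List.countP_eq_zero]
    intro a ha
    obtain ⟨i, hi, hgi⟩ := List.mem_iff_getElem.mp ha
    have hlen : r + i < ls.length := by
      have := List.length_drop (l := ls) (i := r); omega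
    have : a = ls.getD (r + i) 0 := by
      rw [List.getD_eq_getElem ls 0 hlen, ← hgi, List.getElem_drop]
    rw [this]
    simpa using h2 (r + i) (by omega) hlen
  omega

/-- B's value via the frontier: on the sorted prefixes, len - bsearch = countP (2p ≥ total). -/
lemma b_eq_count (P : List Int) (tot : Int) :
    ((PySem.List.sorted P (fun x => x) false).length : Int)
      - (pvBsearch (PySem.List.sorted P (fun x => x) false)
          (PySem.Int.floordiv (tot + 1) 2) 0
          (PySem.List.sorted P (fun x => x) false).length : Int)
      = (P.countP (fun p => decide (2 * p ≥ tot)) : Int) := by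
  set t := PySem.Int.floordiv (tot + 1) 2 with ht
  set S := PySem.List.sorted P (fun x => x) false with hS
  have hp : S.Pairwise (· ≤ ·) := by
    have := PySem.List.sorted_pairwise P (fun x => x)
    simpa [hS] using this
  obtain ⟨f1, f2, f3⟩ := bsearch_frontier S t hp 0 S.length (Nat.zero_le _) (le_refl _)
    (fun i hi => absurd hi (by omega)) (fun i h1 h2 => absurd h2 (by omega))
  have hcnt : S.countP (fun p => decide (p < t)) = pvBsearch S t 0 S.length :=
    countP_eq_frontier S t _ f3 f1 f2
  have hperm : S.Perm P := PySem.List.sorted_perm P (fun x => x) false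
  have hpred : ∀ p : Int, (decide (2 * p ≥ tot)) = !(decide (p < t)) := by
    intro p
    have h2 : t = (tot + 1) / 2 := PySem.Int.floordiv_eq_ediv_of_pos (by norm_num)
    by_cases h : 2 * p ≥ tot
    · have : ¬ p < t := by omega
      simp [h, this]
    · have : p < t := by omega
      simp [h, this]
  have hsplit : S.length = S.countP (fun p => decide (p < t))
      + S.countP (fun p => decide (2 * p ≥ tot)) := by
    have := List.length_eq_countP_add_countP (l := S) (fun p => decide (p < t))
    have hcong : S.countP (fun a => decide ¬ (decide (p := a < t)) = true)
        = S.countP (fun p => decide (2 * p ≥ tot)) := by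
      apply List.countP_congr
      intro a _
      rw [hpred a]
      simp
    rw [this, hcong]
  rw [← hperm.countP_eq]
  omega

-- ===== VERDICT (by name: the statement is the Claim_ definition above) =====
theorem waysToSplitArray_spec : Claim_equal_waysToSplitArray := by
  intro nums _
  unfold Spec_waysToSplitArray waysToSplitArray waysToSplitArray_alt
  simp only [b_build, List.nil_append, PySem.List.slice_zero_start, foldl_add_eq_sum,
    a_loop, zero_add]
  exact (b_eq_count (prefixSums (PySem.List.slice nums none (some (-1))) 0) nums.sum).symm
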